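-- pv_equiv track=rewrite | github.com/iWiley/DDD | entrypoint.py | _match_health_header
-- ===== SOURCE A (Python) =====
-- def _match_health_header(headers_text: str, header_name: str, header_value: str | None):
--     if not headers_text:
--         return False
--     # 简单大小写不敏感匹配
--     lines = headers_text.splitlines()
--     for ln in lines[1:]:  # 跳过请求行
--         if not ln:
--             continue
--         if ":" not in ln:
--             continue
--         name, val = ln.split(":", 1)
--         if name.strip().lower() == header_name.lower():
--             if header_value is None:
--                 return True
--             return header_value.strip() in val.strip()
--     return False
-- ===== SOURCE B (Python) =====
-- def _match_health_header(headers_text: str, header_name: str, header_value: str | None):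
--     if not headers_text:
--         return False
--     # build a first-occurrence-wins index of header name -> raw value, then one lookup
--     table = {}
--     for ln in headers_text.splitlines()[1:]:  # skip the request line
--         if ":" in ln:
--             name, val = ln.split(":", 1)
--             table.setdefault(name.strip().lower(), val)
--     stored = table.get(header_name.lower())
--     if stored is None:
--         return False
--     if header_value is None:
--         return True
--     return header_value.strip() in stored.strip()
-- ===== Notes on version B (the rewrite author's own statement) =====
-- stated objective: idiomatic
-- what changed: Replaces A's early-exit scan over lines by building a first-occurrence-wins dict index from header name to raw value and then answering with a single lookup.
import Mathlib
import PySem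

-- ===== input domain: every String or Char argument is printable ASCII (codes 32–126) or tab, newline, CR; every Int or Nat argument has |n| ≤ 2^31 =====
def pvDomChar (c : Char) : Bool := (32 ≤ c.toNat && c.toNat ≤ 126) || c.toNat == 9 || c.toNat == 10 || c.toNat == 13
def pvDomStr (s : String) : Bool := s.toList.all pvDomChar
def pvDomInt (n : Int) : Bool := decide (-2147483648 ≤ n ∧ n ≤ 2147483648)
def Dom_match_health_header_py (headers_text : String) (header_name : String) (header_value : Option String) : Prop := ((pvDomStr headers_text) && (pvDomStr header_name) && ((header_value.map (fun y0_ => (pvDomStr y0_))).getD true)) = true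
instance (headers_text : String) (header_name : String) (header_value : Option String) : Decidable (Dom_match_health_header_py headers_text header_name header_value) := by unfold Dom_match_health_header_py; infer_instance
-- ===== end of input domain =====

-- B replaces A's early-exit scan by an index-build-then-query shape (first occurrence wins); idiomatic, same cost.

-- ===== PORT A =====
-- A's for-loop with early return, as structural recursion over the remaining lines.
def pvALoop (header_name : String) (header_value : Option String) : List (List Char) → Bool
  | [] => false
  | ln :: rest =>
    if ln = [] then pvALoop header_name header_value rest
    else if PySem.Chars.isIn [':'] ln = false then pvALoop header_name header_value rest
    else
      match PySem.Chars.splitOnMax ln [':'] 1 with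
      | name :: val :: _ =>
        if PySem.Chars.lower (PySem.Chars.strip name) = PySem.Chars.lower header_name.toList then
          match header_value with
          | none => true
          | some hv => PySem.Chars.isIn (PySem.Chars.strip hv.toList) (PySem.Chars.strip val)
        else pvALoop header_name header_value rest
      | _ => pvALoop header_name header_value rest  -- unreachable: ":" ∈ ln gives two pieces

def match_health_header_py (headers_text : String) (header_name : String) (header_value : Option String) : Bool :=
  if headers_text.toList = [] then false
  else
    pvALoop header_name header_value
      (PySem.List.slice (PySem.Chars.splitlines headers_text.toList) (some 1) none)

-- ===== PORT B =====
-- one line of Source B's loop body: table.setdefault(name.strip().lower(), val) when ":" in ln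
def pvBStep (d : PySem.Dict (List Char) (List Char)) (ln : List Char) : PySem.Dict (List Char) (List Char) :=
  if PySem.Chars.isIn [':'] ln then
    match PySem.Chars.splitOnMax ln [':'] 1 with
    | name :: val :: _ => d.setdefault (PySem.Chars.lower (PySem.Chars.strip name)) val
    | _ => d
  else d

def match_health_header_py_alt (headers_text : String) (header_name : String) (header_value : Option String) : Bool :=
  if headers_text.toList = [] then false
  else
    let table :=
      (PySem.List.slice (PySem.Chars.splitlines headers_text.toList) (some 1) none).foldl
        pvBStep PySem.Dict.empty
    match table.get? (PySem.Chars.lower header_name.toList) with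
    | none => false
    | some stored =>
      match header_value with
      | none => true
      | some hv => PySem.Chars.isIn (PySem.Chars.strip hv.toList) (PySem.Chars.strip stored)

-- ===== PRECONDITION & SPEC =====
def Spec_match_health_header_py (headers_text : String) (header_name : String) (header_value : Option String) (out : Bool) : Prop := out = match_health_header_py_alt headers_text header_name header_value
instance (headers_text : String) (header_name : String) (header_value : Option String) (out : Bool) : Decidable (Spec_match_health_header_py headers_text header_name header_value out) := by unfold Spec_match_health_header_py; infer_instance

-- ===== CLAIM (what is proved, stated in full; the proofs are below) =====
def Claim_equal_match_health_header_py : Prop := ∀ (headers_text : String) (header_name : String) (header_value : Option String), Dom_match_health_header_py headers_text header_name header_value → Spec_match_health_header_py headers_text header_name header_value (match_health_header_py headers_text header_name header_value)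

-- ===== LEMMAS AND PROOFS =====

-- one step of B's dict build only matters for a key through its own setdefault or the prior dict
theorem pvBStep_get? (d : PySem.Dict (List Char) (List Char)) (ln : List Char) (k : List Char) :
    (pvBStep d ln).get? k = (d.get? k).or ((pvBStep PySem.Dict.empty ln).get? k) := by
  unfold pvBStep
  split
  · split
    · rename_i name val _ _
      by_cases hk : k = PySem.Chars.lower (PySem.Chars.strip name)
      · subst hk
        rw [PySem.Dict.get?_setdefault_self, PySem.Dict.get?_setdefault_self]
        rw [PySem.Dict.get?_empty]
        cases d.get? (PySem.Chars.lower (PySem.Chars.strip name)) <;> simp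
      · rw [PySem.Dict.get?_setdefault_of_ne _ _ hk,
            PySem.Dict.get?_setdefault_of_ne _ _ hk]
        simp [PySem.Dict.get?_empty]
    · simp [PySem.Dict.get?_empty]
  · simp [PySem.Dict.get?_empty]

-- the first-occurrence-wins fold: initial entries shadow everything built later
theorem pvB_foldl_get? (l : List (List Char)) (d : PySem.Dict (List Char) (List Char)) (k : List Char) :
    (l.foldl pvBStep d).get? k
      = (d.get? k).or ((l.foldl pvBStep PySem.Dict.empty).get? k) := by
  induction l generalizing d with
  | nil => simp [PySem.Dict.get?_empty]
  | cons ln rest ih =>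
    simp only [List.foldl_cons]
    rw [ih (pvBStep d ln), ih (pvBStep PySem.Dict.empty ln), pvBStep_get?, Option.or_assoc]

-- A's scan over the lines equals B's query of the dict built from the same lines
theorem pvLoop_eq_query (header_name : String) (header_value : Option String)
    (l : List (List Char)) :
    pvALoop header_name header_value l
      = (match (l.foldl pvBStep PySem.Dict.empty).get? (PySem.Chars.lower header_name.toList) with
         | none => false
         | some stored =>
           match header_value with
           | none => true
           | some hv => PySem.Chars.isIn (PySem.Chars.strip hv.toList) (PySem.Chars.strip stored)) := by
  induction l with
  | nil => simp [pvALoop, PySem.Dict.get?_empty]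
  | cons ln rest ih =>
    rw [List.foldl_cons, pvB_foldl_get? rest (pvBStep PySem.Dict.empty ln)]
    by_cases hln : ln = []
    · subst hln
      have hstep : pvBStep PySem.Dict.empty [] = PySem.Dict.empty := rfl
      rw [hstep, PySem.Dict.get?_empty]
      simpa [pvALoop] using ih
    · by_cases hin : PySem.Chars.isIn [':'] ln = false
      · have hstep : pvBStep PySem.Dict.empty ln = PySem.Dict.empty := by
          simp [pvBStep, hin]
        rw [hstep, PySem.Dict.get?_empty]
        simpa [pvALoop, hln, hin] using ih
      · rw [Bool.not_eq_false] at hin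
        cases hsp : PySem.Chars.splitOnMax ln [':'] 1 with
        | nil =>
          have hstep : pvBStep PySem.Dict.empty ln = PySem.Dict.empty := by
            simp [pvBStep, hin, hsp]
          rw [hstep, PySem.Dict.get?_empty]
          simpa [pvALoop, hln, hin, hsp] using ih
        | cons name tl =>
          cases tl with
          | nil =>
            have hstep : pvBStep PySem.Dict.empty ln = PySem.Dict.empty := by
              simp [pvBStep, hin, hsp]
            rw [hstep, PySem.Dict.get?_empty]
            simpa [pvALoop, hln, hin, hsp] using ih
          | cons val tl2 =>
            have hstep : pvBStep PySem.Dict.empty ln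
                = PySem.Dict.empty.setdefault (PySem.Chars.lower (PySem.Chars.strip name)) val := by
              simp [pvBStep, hin, hsp]
            rw [hstep]
            by_cases hk : PySem.Chars.lower (PySem.Chars.strip name)
                = PySem.Chars.lower header_name.toList
            · rw [← hk, PySem.Dict.get?_setdefault_self, PySem.Dict.get?_empty]
              simp [pvALoop, hln, hin, hsp, hk]
            · rw [PySem.Dict.get?_setdefault_of_ne _ _ (fun h => hk h.symm),
                  PySem.Dict.get?_empty]
              simpa [pvALoop, hln, hin, hsp, hk] using ih

-- ===== VERDICT (by name: the statement is the Claim_ definition above) =====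
theorem match_health_header_py_spec : Claim_equal_match_health_header_py := by
  intro ht hn hv _
  unfold Spec_match_health_header_py match_health_header_py match_health_header_py_alt
  by_cases h : ht.toList = []
  · simp [h]
  · simp only [if_neg h]
    exact pvLoop_eq_query hn hv _
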